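-- pv_equiv track=rewrite | github.com/neynt/nptools | activities/shapeshifter_bad.py | sub_shapes
-- ===== SOURCE A (Python) =====
-- def sub_shapes(s1, s2, N):
--     res = 0
--     b = 1
--     while s1 or s2:
--         res += b * ((s1 % N - s2 % N) % N)
--         b *= N
--         s1 //= N
--         s2 //= N
--     return res
-- ===== SOURCE B (Python) =====
-- def sub_shapes(s1, s2, N):
--     # Extract base-N digit lists separately, zero-pad the shorter,
--     # subtract digit-wise mod N, then rebuild the integer by Horner.
--     d1 = []
--     while s1:
--         d1.append(s1 % N)
--         s1 //= N
--     d2 = []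
--     while s2:
--         d2.append(s2 % N)
--         s2 //= N
--     n = max(len(d1), len(d2))
--     d1 += [0] * (n - len(d1))
--     d2 += [0] * (n - len(d2))
--     out = [(a - b) % N for a, b in zip(d1, d2)]
--     res = 0
--     for d in reversed(out):
--         res = res * N + d
--     return res
-- ===== Notes on version B (the rewrite author's own statement) =====
-- stated objective: alternative
-- what changed: Replaces A's single fused while-loop (accumulating result and base power in-step) by three separate passes: extract each argument's base-N digit list with its own while-loop, subtract digit-wise mod N over zero-padded lists, then rebuild the integer with Horner's method.
import Mathlib
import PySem

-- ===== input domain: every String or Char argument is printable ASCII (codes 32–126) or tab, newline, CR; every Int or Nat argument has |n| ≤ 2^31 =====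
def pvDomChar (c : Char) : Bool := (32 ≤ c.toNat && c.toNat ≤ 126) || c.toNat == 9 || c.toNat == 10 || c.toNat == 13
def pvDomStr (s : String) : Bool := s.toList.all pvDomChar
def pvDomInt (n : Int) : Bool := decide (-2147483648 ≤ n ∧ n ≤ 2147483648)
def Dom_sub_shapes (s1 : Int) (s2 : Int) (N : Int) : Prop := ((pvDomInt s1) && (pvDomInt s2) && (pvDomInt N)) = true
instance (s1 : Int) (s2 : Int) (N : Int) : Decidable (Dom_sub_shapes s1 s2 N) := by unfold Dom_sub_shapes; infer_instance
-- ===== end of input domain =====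

-- B changes the decomposition: three separate passes (digit extraction of each argument,
-- digit-wise subtraction mod N over zero-padded lists, Horner reconstruction) instead of
-- A's single fused while-loop; same cost, objective 'alternative'.


-- ===== PORT A =====
-- A's while-loop; fuel 100 only makes the recursion total: inside Dom ∩ Pre_ the loop
-- runs at most 33 iterations, so the fuel guard is never the reason the loop stops.
def subShapesLoop (fuel : Nat) (s1 s2 N res b : Int) : Int :=
  match fuel with
  | 0 => res
  | f + 1 =>
    if s1 ≠ 0 ∨ s2 ≠ 0 then
      subShapesLoop f (PySem.Int.floordiv s1 N) (PySem.Int.floordiv s2 N) N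
        (res + b * PySem.Int.mod (PySem.Int.mod s1 N - PySem.Int.mod s2 N) N) (b * N)
    else res

def sub_shapes (s1 : Int) (s2 : Int) (N : Int) : Int :=
  subShapesLoop 100 s1 s2 N 0 1

-- ===== PORT B =====
-- B's digit-extraction while-loop (same fuel-guard remark as above).
def digitsB (fuel : Nat) (x N : Int) : List Int :=
  match fuel with
  | 0 => []
  | f + 1 =>
    if x ≠ 0 then PySem.Int.mod x N :: digitsB f (PySem.Int.floordiv x N) N else []

def sub_shapes_alt (s1 : Int) (s2 : Int) (N : Int) : Int :=
  let d1 := digitsB 100 s1 N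
  let d2 := digitsB 100 s2 N
  let n := max d1.length d2.length
  let d1p := d1 ++ List.replicate (n - d1.length) 0
  let d2p := d2 ++ List.replicate (n - d2.length) 0
  let out := (d1p.zip d2p).map (fun p => PySem.Int.mod (p.1 - p.2) N)
  out.reverse.foldl (fun r d => r * N + d) 0

-- ===== PRECONDITION & SPEC =====
-- Exactly the inputs on which the Python A terminates (returns): otherwise the loop
-- never reaches s1 = s2 = 0 (negative operand with N ≥ 2, or |N| ≤ 1 with a nonzero
-- operand: infinite loop / ZeroDivisionError).
def Pre_sub_shapes (s1 : Int) (s2 : Int) (N : Int) : Prop :=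
  (s1 = 0 ∧ s2 = 0) ∨ N ≤ -2 ∨ (2 ≤ N ∧ 0 ≤ s1 ∧ 0 ≤ s2)
instance (s1 : Int) (s2 : Int) (N : Int) : Decidable (Pre_sub_shapes s1 s2 N) := by
  unfold Pre_sub_shapes; infer_instance

def pvWitness_sub_shapes : Int × Int × Int := (7, 5, 3)

def Spec_sub_shapes (s1 : Int) (s2 : Int) (N : Int) (out : Int) : Prop := out = sub_shapes_alt s1 s2 N
instance (s1 : Int) (s2 : Int) (N : Int) (out : Int) : Decidable (Spec_sub_shapes s1 s2 N out) := by
  unfold Spec_sub_shapes; infer_instance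

-- ===== CLAIM (what is proved, stated in full; the proofs are below) =====
def Claim_equal_sub_shapes : Prop := ∀ (s1 : Int) (s2 : Int) (N : Int), Dom_sub_shapes s1 s2 N → Pre_sub_shapes s1 s2 N → Spec_sub_shapes s1 s2 N (sub_shapes s1 s2 N)

-- ===== LEMMAS AND PROOFS =====

-- Fused digit stream, the common intermediate: one digit of A's loop per step.
def subdigs (fuel : Nat) (s1 s2 N : Int) : List Int :=
  match fuel with
  | 0 => []
  | f + 1 =>
    if s1 ≠ 0 ∨ s2 ≠ 0 then
      PySem.Int.mod (PySem.Int.mod s1 N - PySem.Int.mod s2 N) N ::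
        subdigs f (PySem.Int.floordiv s1 N) (PySem.Int.floordiv s2 N) N
    else []

-- zip-with-zero-padding of the two digit lists, combined with (a-b) % N.
def combineZ (N : Int) : List Int → List Int → List Int
  | [], [] => []
  | a :: as, [] => PySem.Int.mod (a - 0) N :: combineZ N as []
  | [], b :: bs => PySem.Int.mod (0 - b) N :: combineZ N [] bs
  | a :: as, b :: bs => PySem.Int.mod (a - b) N :: combineZ N as bs

def horner (N : Int) (l : List Int) : Int := l.reverse.foldl (fun r d => r * N + d) 0

theorem horner_nil (N : Int) : horner N [] = 0 := rfl

theorem horner_cons (N h : Int) (t : List Int) : horner N (h :: t) = h + N * horner N t := by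
  simp [horner, List.foldl_append]; ring

theorem mod_zero_left (N : Int) : PySem.Int.mod 0 N = 0 := by simp [PySem.Int.mod]

theorem floordiv_zero_left (N : Int) : PySem.Int.floordiv 0 N = 0 := by simp [PySem.Int.floordiv]

theorem digitsB_zero (f : Nat) (N : Int) : digitsB f 0 N = [] := by
  cases f <;> simp [digitsB]

-- B's padded-zip-map equals combineZ (pure list facts).
theorem zipPad_left (N : Int) (bs : List Int) :
    ((List.replicate bs.length (0 : Int)).zip bs).map
      (fun p : Int × Int => PySem.Int.mod (p.1 - p.2) N) = combineZ N [] bs := by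
  induction bs with
  | nil => simp [combineZ]
  | cons b bs ih => simp only [List.length_cons, List.replicate_succ, List.zip_cons_cons,
      List.map_cons, combineZ, ih]

theorem zipPad_right (N : Int) (as : List Int) :
    (as.zip (List.replicate as.length (0 : Int))).map
      (fun p : Int × Int => PySem.Int.mod (p.1 - p.2) N) = combineZ N as [] := by
  induction as with
  | nil => simp [combineZ]
  | cons a as ih => simp only [List.length_cons, List.replicate_succ, List.zip_cons_cons,
      List.map_cons, combineZ, ih]

theorem zipPad_eq_combineZ (N : Int) (d1 d2 : List Int) :
    ((d1 ++ List.replicate (max d1.length d2.length - d1.length) 0).zip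
      (d2 ++ List.replicate (max d1.length d2.length - d2.length) 0)).map
        (fun p : Int × Int => PySem.Int.mod (p.1 - p.2) N) = combineZ N d1 d2 := by
  induction d1 generalizing d2 with
  | nil =>
    rw [List.length_nil, Nat.zero_max, Nat.sub_self, List.replicate_zero, List.append_nil,
      List.nil_append, Nat.sub_zero]
    exact zipPad_left N d2
  | cons a as ih =>
    cases d2 with
    | nil =>
      rw [List.length_nil, Nat.max_zero, Nat.sub_self, List.replicate_zero, List.append_nil,
        List.nil_append, Nat.sub_zero]
      exact zipPad_right N (a :: as)
    | cons b bs =>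
      simp only [List.length_cons, Nat.succ_max_succ, Nat.succ_sub_succ, List.cons_append,
        List.zip_cons_cons, List.map_cons, combineZ, ih bs]

-- combineZ of the two separately extracted digit lists is the fused digit stream.
theorem combineZ_digits (f : Nat) (s1 s2 N : Int) :
    combineZ N (digitsB f s1 N) (digitsB f s2 N) = subdigs f s1 s2 N := by
  induction f generalizing s1 s2 with
  | zero => simp [digitsB, subdigs, combineZ]
  | succ f ih =>
    by_cases h1 : s1 = 0
    · by_cases h2 : s2 = 0
      · simp [digitsB, subdigs, h1, h2, combineZ]
      · have := ih 0 (PySem.Int.floordiv s2 N)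
        simp [digitsB, subdigs, h1, h2, combineZ, mod_zero_left, floordiv_zero_left,
          digitsB_zero] at this ⊢
        simpa [digitsB_zero] using this
    · by_cases h2 : s2 = 0
      · have := ih (PySem.Int.floordiv s1 N) 0
        simp [digitsB, subdigs, h1, h2, combineZ, mod_zero_left, floordiv_zero_left,
          digitsB_zero] at this ⊢
        simpa [digitsB_zero] using this
      · have := ih (PySem.Int.floordiv s1 N) (PySem.Int.floordiv s2 N)
        simp [digitsB, subdigs, h1, h2, combineZ] at this ⊢
        exact this

-- A's loop accumulates exactly res + b · horner of the fused digit stream.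
theorem subShapesLoop_eq (f : Nat) (s1 s2 N res b : Int) :
    subShapesLoop f s1 s2 N res b = res + b * horner N (subdigs f s1 s2 N) := by
  induction f generalizing s1 s2 res b with
  | zero => simp [subShapesLoop, subdigs, horner_nil]
  | succ f ih =>
    by_cases h : s1 ≠ 0 ∨ s2 ≠ 0
    · simp only [subShapesLoop, subdigs, if_pos h, ih, horner_cons]; ring
    · simp [subShapesLoop, subdigs, h, horner_nil]

-- ===== VERDICT (by name: the statement is the Claim_ definition above) =====
theorem sub_shapes_spec : Claim_equal_sub_shapes := by
  intro s1 s2 N _ _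
  unfold Spec_sub_shapes sub_shapes sub_shapes_alt
  rw [subShapesLoop_eq]
  simp only [zipPad_eq_combineZ, combineZ_digits, horner, one_mul, zero_add]
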